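-- pv_equiv track=rewrite | github.com/CAG2Mark/aoc-2025 | day04/p1.py | solve
-- ===== SOURCE A (Python) =====
-- from typing import List
--
-- def solve(inp: List[str]):
--   r = len(inp)
--   c = len(inp[0])
--
--   def cnt(i: int, j: int):
--     tot = 0
--     for y in range(max(0, i - 1), min(r, i + 2)):
--       for x in range(max(0, j - 1), min(c, j + 2)):
--         tot += inp[y][x] == '@'
--     return tot
--
--   ans = 0
--   for i in range(r):
--     for j in range(c):
--       if inp[i][j] == '@' and cnt(i, j) < 5: ans += 1
--   return ans
-- ===== SOURCE B (Python) =====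
-- from typing import List
--
-- def solve(inp: List[str]):
--   r = len(inp)
--   c = len(inp[0])
--
--   # 2D prefix sums: P[i][j] = number of '@' in rows < i, columns < j
--   P = [[0] * (c + 1)]
--   for i in range(r):
--     row = inp[i]
--     rp = [0]
--     s = 0
--     for j in range(c):
--       s += row[j] == '@'
--       rp.append(s)
--     P.append([a + b for a, b in zip(P[i], rp)])
--
--   ans = 0
--   for i in range(r):
--     row = inp[i]
--     for j in range(c):
--       if row[j] == '@':
--         y0 = max(0, i - 1); y1 = min(r, i + 2)
--         x0 = max(0, j - 1); x1 = min(c, j + 2)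
--         if P[y1][x1] - P[y0][x1] - P[y1][x0] + P[y0][x0] < 5:
--           ans += 1
--   return ans
-- ===== Notes on version B (the rewrite author's own statement) =====
-- stated objective: alternative
-- what changed: B builds a 2D prefix-sum table of '@' counts in one pass and obtains each cell's clamped 3x3 neighborhood count by inclusion-exclusion on the table, instead of re-scanning the up-to-9 window cells for every '@' cell.
import Mathlib
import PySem

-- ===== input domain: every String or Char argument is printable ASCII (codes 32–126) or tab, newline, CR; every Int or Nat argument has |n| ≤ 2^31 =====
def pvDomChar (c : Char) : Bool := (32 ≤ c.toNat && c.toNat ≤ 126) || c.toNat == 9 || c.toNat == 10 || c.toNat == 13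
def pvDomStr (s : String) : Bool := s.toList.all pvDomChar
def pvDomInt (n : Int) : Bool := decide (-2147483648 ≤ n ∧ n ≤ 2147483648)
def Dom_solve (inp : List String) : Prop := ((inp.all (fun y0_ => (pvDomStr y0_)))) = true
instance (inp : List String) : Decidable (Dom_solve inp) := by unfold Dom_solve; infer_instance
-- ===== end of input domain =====

-- B replaces A's per-'@'-cell 3x3 rescan by a 2D prefix-sum table queried with inclusion-exclusion (alternative decomposition, same asymptotic cost).

-- ===== PORT A =====
-- inp[y][x] is ported as pyGetD on the row list / char list; under Pre_solve every such
-- index is in range, so the defaults are never consulted (where Python raises, Pre_ excludes).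
def solve (inp : List String) : Int :=
  let r : Int := inp.length
  let c : Int := ((PySem.List.pyGetD inp 0 "").toList.length : Int)
  let cnt : Int → Int → Int := fun i j =>
    (PySem.List.pyRange (max 0 (i - 1)) (min r (i + 2)) 1).foldl (fun tot y =>
      (PySem.List.pyRange (max 0 (j - 1)) (min c (j + 2)) 1).foldl (fun tot x =>
        tot + (if (PySem.List.pyGetD (PySem.List.pyGetD inp y "").toList x ' ') = '@' then 1 else 0)) tot) 0
  (PySem.List.pyRange 0 r 1).foldl (fun ans i =>
    (PySem.List.pyRange 0 c 1).foldl (fun ans j =>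
      if (PySem.List.pyGetD (PySem.List.pyGetD inp i "").toList j ' ') = '@' ∧ cnt i j < 5 then ans + 1 else ans) ans) 0

-- ===== PORT B =====
def solve_alt (inp : List String) : Int :=
  let r : Int := inp.length
  let c : Int := ((PySem.List.pyGetD inp 0 "").toList.length : Int)
  -- P[i][j] = number of '@' in rows < i, columns < j
  let P : List (List Int) :=
    (PySem.List.pyRange 0 r 1).foldl (fun P i =>
      let row := (PySem.List.pyGetD inp i "").toList
      let rps : List Int × Int :=
        (PySem.List.pyRange 0 c 1).foldl (fun (st : List Int × Int) j =>
          let s := st.2 + (if PySem.List.pyGetD row j ' ' = '@' then 1 else 0)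
          (st.1 ++ [s], s)) ([(0 : Int)], 0)
      P ++ [((PySem.List.pyGetD P i []).zip rps.1).map (fun p => p.1 + p.2)])
      [List.replicate ((c + 1).toNat) (0 : Int)]
  (PySem.List.pyRange 0 r 1).foldl (fun ans i =>
    let row := (PySem.List.pyGetD inp i "").toList
    (PySem.List.pyRange 0 c 1).foldl (fun ans j =>
      if PySem.List.pyGetD row j ' ' = '@' then
        if PySem.List.pyGetD (PySem.List.pyGetD P (min r (i + 2)) []) (min c (j + 2)) 0
           - PySem.List.pyGetD (PySem.List.pyGetD P (max 0 (i - 1)) []) (min c (j + 2)) 0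
           - PySem.List.pyGetD (PySem.List.pyGetD P (min r (i + 2)) []) (max 0 (j - 1)) 0
           + PySem.List.pyGetD (PySem.List.pyGetD P (max 0 (i - 1)) []) (max 0 (j - 1)) 0 < 5
        then ans + 1 else ans
      else ans) ans) 0

-- ===== PRECONDITION & SPEC =====
-- Pre_ excludes exactly the inputs on which A raises IndexError: the empty list (inp[0])
-- and ragged grids with some row shorter than the first (inp[y][x] for x < len(inp[0])).
def Pre_solve (inp : List String) : Prop :=
  inp ≠ [] ∧ ∀ s ∈ inp, (inp.headD "").toList.length ≤ s.toList.length
instance (inp : List String) : Decidable (Pre_solve inp) := by unfold Pre_solve; infer_instance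
def pvWitness_solve : List String := ["@@.", "@@@", ".@."]
def Spec_solve (inp : List String) (out : Int) : Prop := out = solve_alt inp
instance (inp : List String) (out : Int) : Decidable (Spec_solve inp out) := by unfold Spec_solve; infer_instance

-- ===== CLAIM (what is proved, stated in full; the proofs are below) =====
def Claim_equal_solve : Prop := ∀ (inp : List String), Dom_solve inp → Pre_solve inp → Spec_solve inp (solve inp)

-- ===== LEMMAS AND PROOFS =====

-- 0/1 indicator of cell (y, x) holding '@' (out-of-range defaults are never hit under Pre_)
def pvG (inp : List String) (y x : Int) : Int :=
  if (PySem.List.pyGetD (PySem.List.pyGetD inp y "").toList x ' ') = '@' then 1 else 0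

-- prefix sum of one row: number of '@' in row y, columns < m
noncomputable def pvRowP (inp : List String) (y m : Int) : Int :=
  ∑ x ∈ Finset.Ico (0 : Int) m, pvG inp y x

-- 2D prefix sum: number of '@' in rows < n, columns < m
noncomputable def pvPf (inp : List String) (n m : Int) : Int :=
  ∑ y ∈ Finset.Ico (0 : Int) n, pvRowP inp y m

-- row k of the prefix-sum table B builds
noncomputable def pvRow (inp : List String) (c : Nat) (k : Int) : List Int :=
  (List.range (c + 1)).map (fun m : Nat => pvPf inp k (m : Int))

theorem pvIcoSingleton (a : Int) : Finset.Ico a (a + 1) = {a} := by ext x; simp; omega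

theorem pvSumSplit (f : Int → Int) {a b c : Int} (h1 : a ≤ b) (h2 : b ≤ c) :
    (∑ x ∈ Finset.Ico a b, f x) + ∑ x ∈ Finset.Ico b c, f x = ∑ x ∈ Finset.Ico a c, f x := by
  rw [← Finset.Ico_union_Ico_eq_Ico h1 h2,
      Finset.sum_union (Finset.Ico_disjoint_Ico_consecutive a b c)]

theorem pvSumTop (f : Int → Int) {b : Int} (h : 0 ≤ b) :
    ∑ x ∈ Finset.Ico 0 (b + 1), f x = (∑ x ∈ Finset.Ico 0 b, f x) + f b := by
  rw [← pvSumSplit f h (by omega : b ≤ b + 1), pvIcoSingleton, Finset.sum_singleton]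

theorem pvRowP_succ (inp : List String) (i : Int) (n : Nat) :
    pvRowP inp i ((n : Int) + 1) = pvRowP inp i n + pvG inp i n :=
  pvSumTop (pvG inp i) (by omega)

theorem pvPf_succ (inp : List String) (n : Nat) (m : Int) :
    pvPf inp ((n : Int) + 1) m = pvPf inp n m + pvRowP inp n m :=
  pvSumTop (fun y => pvRowP inp y m) (by omega)

-- B's inner loop builds exactly the row-prefix-sum list of row i
theorem pvInner (inp : List String) (i : Int) (n : Nat) :
    List.foldl (fun (st : List Int × Int) j =>
        (st.1 ++ [st.2 + pvG inp i j], st.2 + pvG inp i j))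
      ([(0 : Int)], 0) (PySem.List.pyRange 0 (n : Int) 1)
    = ((List.range (n + 1)).map (fun k : Nat => pvRowP inp i (k : Int)), pvRowP inp i (n : Int)) := by
  induction n with
  | zero => simp [pvRowP]
  | succ k ih =>
    rw [show ((k + 1 : Nat) : Int) = (k : Int) + 1 by push_cast; ring,
        PySem.List.pyRange_one_succ_right (by omega : (0:Int) ≤ (k:Int)),
        List.foldl_append, ih]
    simp only [List.foldl_cons, List.foldl_nil, Prod.mk.injEq]
    constructor
    · rw [List.range_succ (n := k + 1), List.map_append, List.map_cons, List.map_nil,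
          ← pvRowP_succ]
      norm_num
    · rw [← pvRowP_succ]

theorem pvRowZero (inp : List String) (c : Nat) :
    pvRow inp c ((0:Nat) : Int) = List.replicate (c + 1) (0 : Int) := by
  rw [pvRow, show (fun m : Nat => pvPf inp ((0:Nat):Int) (m:Int)) = Function.const Nat (0:Int)
        from funext (fun m => by simp [pvPf]), List.map_const, List.length_range]

-- B's outer loop builds exactly the 2D prefix-sum table
theorem pvOuter (inp : List String) (c : Nat) (n : Nat) :
    List.foldl (fun (P : List (List Int)) i =>
        P ++ [((PySem.List.pyGetD P i []).zip
            ((List.foldl (fun (st : List Int × Int) j =>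
                (st.1 ++ [st.2 + pvG inp i j], st.2 + pvG inp i j))
              ([(0 : Int)], 0) (PySem.List.pyRange 0 (c : Int) 1)).1)).map
          (fun p => p.1 + p.2)])
      [List.replicate (c + 1) (0 : Int)] (PySem.List.pyRange 0 (n : Int) 1)
    = (List.range (n + 1)).map (fun k : Nat => pvRow inp c (k : Int)) := by
  induction n with
  | zero =>
    simp only [Nat.cast_zero, PySem.List.pyRange_one_eq_nil (le_refl (0:Int)), List.foldl_nil]
    rw [← pvRowZero inp c]
    rfl
  | succ k ih =>
    rw [show ((k + 1 : Nat) : Int) = (k : Int) + 1 by push_cast; ring,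
        PySem.List.pyRange_one_succ_right (by omega : (0:Int) ≤ (k:Int)),
        List.foldl_append, ih]
    simp only [List.foldl_cons, List.foldl_nil]
    rw [pvInner inp (k : Int) c]
    rw [PySem.List.pyGetD_natCast, PySem.List.getD_map_range _ _ _ _ (by omega : k < k + 1)]
    rw [pvRow, List.zip_map', List.map_map]
    rw [List.range_succ (n := k + 1), List.map_append, List.map_cons, List.map_nil]
    congr 2
    rw [pvRow]
    apply List.map_congr_left
    intro m hm
    simp only [Function.comp]
    rw [show ((k + 1 : Nat) : Int) = (k : Int) + 1 by push_cast; ring, pvPf_succ]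

theorem pvMapSumAux (f : Int → Int) (n : Nat) : ∀ a : Int,
    ((PySem.List.pyRange a (a + n) 1).map f).sum = ∑ t ∈ Finset.Ico a (a + (n:Int)), f t := by
  induction n with
  | zero => intro a; simp
  | succ k ih =>
    intro a
    have hcast : (a : Int) + ((k+1:Nat):Int) = (a + 1) + (k:Int) := by push_cast; ring
    rw [hcast, PySem.List.pyRange_one_cons (by omega : a < (a + 1) + (k:Int))]
    simp only [List.map_cons, List.sum_cons]
    rw [ih (a + 1), ← pvSumSplit f (by omega : a ≤ a + 1) (by omega : a + 1 ≤ (a+1) + (k:Int)),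
        pvIcoSingleton, Finset.sum_singleton]

theorem pvMapSum (f : Int → Int) (a b : Int) :
    ((PySem.List.pyRange a b 1).map f).sum = ∑ t ∈ Finset.Ico a b, f t := by
  by_cases h : b ≤ a
  · rw [PySem.List.pyRange_one_eq_nil h, Finset.Ico_eq_empty (by omega)]; simp
  · have hb : b = a + ((b - a).toNat : Int) := by omega
    rw [hb]; exact pvMapSumAux f (b - a).toNat a

-- a Python accumulation loop over range(a, b) is the Ico sum
theorem pvFoldlAdd (f : Int → Int) (a b init : Int) :
    List.foldl (fun acc t => acc + f t) init (PySem.List.pyRange a b 1)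
      = init + ∑ t ∈ Finset.Ico a b, f t := by
  rw [PySem.List.foldl_add, pvMapSum]

-- inclusion-exclusion: any clamped rectangle sum from four prefix-table values
theorem pvRect (inp : List String) {a b u v : Int}
    (ha : 0 ≤ a) (hab : a ≤ b) (hu : 0 ≤ u) (huv : u ≤ v) :
    (∑ y ∈ Finset.Ico a b, ∑ x ∈ Finset.Ico u v, pvG inp y x)
      = pvPf inp b v - pvPf inp a v - pvPf inp b u + pvPf inp a u := by
  have hrow : ∀ y : Int, (∑ x ∈ Finset.Ico u v, pvG inp y x)
      = pvRowP inp y v - pvRowP inp y u := by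
    intro y
    have := pvSumSplit (pvG inp y) hu huv
    unfold pvRowP; omega
  calc (∑ y ∈ Finset.Ico a b, ∑ x ∈ Finset.Ico u v, pvG inp y x)
      = ∑ y ∈ Finset.Ico a b, (pvRowP inp y v - pvRowP inp y u) :=
        Finset.sum_congr rfl (fun y _ => hrow y)
    _ = (∑ y ∈ Finset.Ico a b, pvRowP inp y v) - ∑ y ∈ Finset.Ico a b, pvRowP inp y u := by
        rw [Finset.sum_sub_distrib]
    _ = pvPf inp b v - pvPf inp a v - pvPf inp b u + pvPf inp a u := by
        have h1 := pvSumSplit (fun y => pvRowP inp y v) ha hab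
        have h2 := pvSumSplit (fun y => pvRowP inp y u) ha hab
        simp only at h1 h2
        unfold pvPf; omega

theorem pvLookup (inp : List String) (c n : Nat) {y x : Int}
    (hy0 : 0 ≤ y) (hyn : y ≤ (n : Int)) (hx0 : 0 ≤ x) (hxc : x ≤ (c : Int)) :
    PySem.List.pyGetD (PySem.List.pyGetD
        ((List.range (n + 1)).map (fun k : Nat => pvRow inp c (k : Int))) y []) x 0
      = pvPf inp y x := by
  obtain ⟨yn, rfl⟩ : ∃ yn : Nat, y = (yn : Int) := ⟨y.toNat, by omega⟩
  obtain ⟨xn, rfl⟩ : ∃ xn : Nat, x = (xn : Int) := ⟨x.toNat, by omega⟩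
  rw [PySem.List.pyGetD_natCast ((List.range (n + 1)).map (fun k : Nat => pvRow inp c (k : Int))) yn [],
      PySem.List.getD_map_range _ _ _ _ (by omega : yn < n + 1), pvRow,
      PySem.List.pyGetD_natCast, PySem.List.getD_map_range _ _ _ _ (by omega : xn < c + 1)]

theorem pvMain (inp : List String) : solve inp = solve_alt inp := by
  unfold solve solve_alt
  simp only []
  have hite : ∀ y x : Int,
      (if (PySem.List.pyGetD (PySem.List.pyGetD inp y "").toList x ' ') = '@' then (1:Int) else 0)
        = pvG inp y x := fun _ _ => rfl
  simp only [hite]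
  rw [show (((((PySem.List.pyGetD inp 0 "").toList.length : Int)) + 1)).toNat
        = (PySem.List.pyGetD inp 0 "").toList.length + 1 by omega]
  rw [pvOuter inp ((PySem.List.pyGetD inp 0 "").toList.length) inp.length]
  apply PySem.List.foldl_congr_mem
  intro acc i hi
  apply PySem.List.foldl_congr_mem
  intro acc2 j hj
  rw [PySem.List.mem_pyRange_one] at hi hj
  have e1 : List.foldl (fun tot y =>
      List.foldl (fun tot x => tot + pvG inp y x) tot
        (PySem.List.pyRange (max 0 (j - 1)) (min ((PySem.List.pyGetD inp 0 "").toList.length : Int) (j + 2)) 1))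
      0 (PySem.List.pyRange (max 0 (i - 1)) (min (inp.length : Int) (i + 2)) 1)
      = pvPf inp (min (inp.length : Int) (i + 2)) (min ((PySem.List.pyGetD inp 0 "").toList.length : Int) (j + 2))
        - pvPf inp (max 0 (i - 1)) (min ((PySem.List.pyGetD inp 0 "").toList.length : Int) (j + 2))
        - pvPf inp (min (inp.length : Int) (i + 2)) (max 0 (j - 1))
        + pvPf inp (max 0 (i - 1)) (max 0 (j - 1)) := by
    simp only [pvFoldlAdd, zero_add]
    exact pvRect inp (by omega) (by omega) (by omega) (by omega)
  rw [e1]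
  rw [pvLookup inp _ _ (by omega) (by omega) (by omega) (by omega),
      pvLookup inp _ _ (by omega) (by omega) (by omega) (by omega),
      pvLookup inp _ _ (by omega) (by omega) (by omega) (by omega),
      pvLookup inp _ _ (by omega) (by omega) (by omega) (by omega)]
  by_cases h1 : (PySem.List.pyGetD (PySem.List.pyGetD inp i "").toList j ' ') = '@'
  · by_cases h2 : pvPf inp (min (inp.length : Int) (i + 2)) (min ((PySem.List.pyGetD inp 0 "").toList.length : Int) (j + 2))
        - pvPf inp (max 0 (i - 1)) (min ((PySem.List.pyGetD inp 0 "").toList.length : Int) (j + 2))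
        - pvPf inp (min (inp.length : Int) (i + 2)) (max 0 (j - 1))
        + pvPf inp (max 0 (i - 1)) (max 0 (j - 1)) < 5 <;>
      simp [h1, h2]
  · simp [h1]

-- ===== VERDICT (by name: the statement is the Claim_ definition above) =====
theorem solve_spec : Claim_equal_solve := by
  intro inp _ _
  unfold Spec_solve
  exact pvMain inp
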